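-- pv_equiv track=rewrite | github.com/ozanmujde/TensorTonic-Solutions | differencing/differencing.py | differencing
-- ===== SOURCE A (Python) =====
-- def differencing(series, order):
--     """
--     Apply d-th order differencing to the time series.
--     """
--     diff = series[:]
--     for _ in range(order):
--         diff_tmp = []
--         for i in range(1, len(diff)):
--             diff_tmp.append(diff[i] - diff[i-1])
--         diff = diff_tmp
--     return diff
-- ===== SOURCE B (Python) =====
-- def differencing(series, order):
--     """Closed-form d-th differencing: convolve once with the signed binomial
--     coefficients of (x-1)^order instead of applying `order` staged passes.
--     Exact on integers."""
--     if order <= 0: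
--         return series[:]
--     n = len(series)
--     if order >= n:
--         return []
--     w = [1]
--     for _ in range(order):
--         w = [a - b for a, b in zip([0] + w, w + [0])]
--     return [sum(w[j] * series[i + j] for j in range(order + 1))
--             for i in range(n - order)]
-- ===== Notes on version B (the rewrite author's own statement) =====
-- stated objective: alternative
-- what changed: Replaced A's order-many staged adjacent-difference passes by a single convolution pass: build the signed binomial coefficient row of (x-1)^order once (Pascal-style), then produce each output element as one weighted sum over a window of the original series; exact since the data are integers.
import Mathlib
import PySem

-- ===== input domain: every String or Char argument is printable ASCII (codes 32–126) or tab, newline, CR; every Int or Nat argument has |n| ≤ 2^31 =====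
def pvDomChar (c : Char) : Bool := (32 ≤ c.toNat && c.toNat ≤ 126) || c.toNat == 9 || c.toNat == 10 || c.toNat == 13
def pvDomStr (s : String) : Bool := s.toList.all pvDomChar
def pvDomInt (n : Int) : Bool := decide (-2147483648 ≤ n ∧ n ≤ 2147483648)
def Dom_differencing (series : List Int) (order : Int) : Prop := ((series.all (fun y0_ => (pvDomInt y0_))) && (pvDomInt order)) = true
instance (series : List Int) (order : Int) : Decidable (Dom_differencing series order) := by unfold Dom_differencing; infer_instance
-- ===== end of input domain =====

-- B computes the d-th difference in one convolution pass with the signed binomial coefficients of (x-1)^order instead of A's `order` staged adjacent-difference passes; return value proved equal to A (exact on ints).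


-- ===== PORT A =====
-- inner loop: diff_tmp = []; for i in range(1, len(diff)): diff_tmp.append(diff[i] - diff[i-1])
def diffStepA (diff : List Int) : List Int :=
  (PySem.List.pyRange 1 (diff.length : Int) 1).foldl
    (fun acc i => acc ++ [PySem.List.pyGetD diff i 0 - PySem.List.pyGetD diff (i - 1) 0]) []

def differencing (series : List Int) (order : Int) : List Int :=
  (PySem.List.pyRange 0 order 1).foldl (fun diff _ => diffStepA diff) series

-- ===== PORT B =====
-- w = [a - b for a, b in zip([0] + w, w + [0])]   (one multiply-by-(x-1) step on the coefficient row)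
def polyStep (w : List Int) : List Int :=
  List.zipWith (fun a b => a - b) (0 :: w) (w ++ [0])

-- sum(w[j] * series[i + j] for j in range(order + 1))
def dotB (w series : List Int) (d i : Nat) : Int :=
  (List.range (d + 1)).foldl (fun acc j => acc + w.getD j 0 * series.getD (i + j) 0) 0

def differencing_alt (series : List Int) (order : Int) : List Int :=
  if order ≤ 0 then series
  else if (series.length : Int) ≤ order then []
  else
    let d := order.toNat
    let w := (List.range d).foldl (fun c _ => polyStep c) [1]
    (List.range (series.length - d)).map (fun i => dotB w series d i)

-- ===== PRECONDITION & SPEC =====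
def Spec_differencing (series : List Int) (order : Int) (out : List Int) : Prop := out = differencing_alt series order
instance (series : List Int) (order : Int) (out : List Int) : Decidable (Spec_differencing series order out) := by unfold Spec_differencing; infer_instance

-- ===== CLAIM (what is proved, stated in full; the proofs are below) =====
def Claim_equal_differencing : Prop := ∀ (series : List Int) (order : Int), Dom_differencing series order → Spec_differencing series order (differencing series order)

-- ===== LEMMAS AND PROOFS =====

-- sum-form of the inner foldl
lemma foldl_range_add (f : Nat → Int) (n : Nat) :
    (List.range n).foldl (fun acc j => acc + f j) 0 = ∑ j ∈ Finset.range n, f j := by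
  induction n with
  | zero => simp
  | succ m ih => rw [List.range_succ, List.foldl_append, ih, Finset.sum_range_succ]; simp

-- sum-form of dotB
def dotS (w s : List Int) (L i : Nat) : Int :=
  ∑ j ∈ Finset.range L, w.getD j 0 * s.getD (i + j) 0

lemma dotB_eq_dotS (w s : List Int) (d i : Nat) : dotB w s d i = dotS w s (d + 1) i :=
  foldl_range_add _ _

-- A's inner loop in closed form
lemma diffStepA_eq (s : List Int) :
    diffStepA s = (List.range (s.length - 1)).map (fun i => s.getD (i + 1) 0 - s.getD i 0) := by
  unfold diffStepA
  rw [PySem.List.foldl_append_singleton_eq_map, PySem.List.pyRange_one, List.nil_append]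
  have hlen : (((s.length : Int)) - 1).toNat = s.length - 1 := by omega
  rw [hlen, List.map_map]
  apply List.ext_getElem
  · simp
  · intro k h1 h2
    simp only [List.length_map, List.length_range] at h1
    simp only [List.getElem_map, List.getElem_range, Function.comp_apply]
    have e2 : (1 : Int) + (k : Int) - 1 = ((k : Nat) : Int) := by ring
    have e1 : (1 : Int) + (k : Int) = ((k + 1 : Nat) : Int) := by push_cast; ring
    rw [e2, e1, PySem.List.pyGetD_natCast, PySem.List.pyGetD_natCast]

-- a foldl that ignores the list elements is an iterate of its step
lemma foldl_const_iterate {α : Type} (f : List Int → List Int) (L : List α) (s : List Int) :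
    L.foldl (fun d _ => f d) s = f^[L.length] s := by
  induction L generalizing s with
  | nil => rfl
  | cons a t ih => simp [List.foldl_cons, ih, Function.iterate_succ_apply]

lemma polyStep_length (w : List Int) : (polyStep w).length = w.length + 1 := by
  simp [polyStep]

lemma polyStep_getD (w : List Int) (j : Nat) (hj : j < w.length + 1) :
    (polyStep w).getD j 0 = (0 :: w).getD j 0 - (w ++ [0]).getD j 0 := by
  have h1 : j < (0 :: w).length := by simpa using hj
  have h2 : j < (w ++ [0]).length := by simp; omega
  have h3 : j < (polyStep w).length := by rw [polyStep_length]; exact hj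
  rw [List.getD_eq_getElem _ _ h3, List.getD_eq_getElem _ _ h1, List.getD_eq_getElem _ _ h2]
  simp [polyStep]

-- one (x-1)-step on coefficients = one adjacent-difference step on the convolution
lemma dotS_step (w s : List Int) (i : Nat) :
    dotS (polyStep w) s (w.length + 1) i = dotS w s w.length (i + 1) - dotS w s w.length i := by
  have hrw : ∀ j ∈ Finset.range (w.length + 1),
      (polyStep w).getD j 0 * s.getD (i + j) 0 =
      (0 :: w).getD j 0 * s.getD (i + j) 0 - (w ++ [0]).getD j 0 * s.getD (i + j) 0 := by
    intro j hj
    simp only [Finset.mem_range] at hj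
    rw [polyStep_getD w j hj, sub_mul]
  unfold dotS
  rw [Finset.sum_congr rfl hrw, Finset.sum_sub_distrib]
  congr 1
  · rw [Finset.sum_range_succ']
    simp only [List.getD_cons_zero, List.getD_cons_succ, zero_mul, add_zero]
    apply Finset.sum_congr rfl
    intro j _
    congr 2
    omega
  · rw [Finset.sum_range_succ]
    have hlast : (w ++ [0]).getD w.length 0 = 0 := by
      rw [List.getD_eq_getElem _ _ (by simp : w.length < (w ++ [0]).length)]
      simp
    rw [hlast, zero_mul, add_zero]
    apply Finset.sum_congr rfl
    intro j hj
    simp only [Finset.mem_range] at hj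
    congr 1
    rw [List.getD_eq_getElem _ _ (by simp; omega : j < (w ++ [0]).length),
      List.getElem_append_left hj, List.getD_eq_getElem _ _ hj]

lemma iterate_polyStep_length (d : Nat) : (polyStep^[d] [1]).length = d + 1 := by
  induction d with
  | zero => rfl
  | succ m ih => rw [Function.iterate_succ_apply', polyStep_length, ih]

-- getD of the mapped range list
lemma getD_map_range (f : Nat → Int) (m k : Nat) (hk : k < m) :
    ((List.range m).map f).getD k 0 = f k := by
  rw [List.getD_eq_getElem _ _ (by simpa using hk)]
  simp

-- core: d iterations of A's step = convolution with (x-1)^d coefficients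
lemma iterate_eq_conv (d : Nat) (s : List Int) :
    diffStepA^[d] s =
      (List.range (s.length - d)).map
        (fun i => dotS (polyStep^[d] [1]) s (d + 1) i) := by
  induction d with
  | zero =>
    simp only [Function.iterate_zero, id_eq, Nat.sub_zero]
    apply List.ext_getElem
    · simp
    · intro k h1 h2
      simp only [List.getElem_map, List.getElem_range, dotS]
      rw [show (0 + 1 : Nat) = 1 from rfl, Finset.sum_range_one]
      simp only [List.getD_cons_zero, one_mul, Nat.add_zero]
      rw [List.getD_eq_getElem _ _ h1]
  | succ d ih =>
    rw [Function.iterate_succ_apply', ih, diffStepA_eq]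
    have hlen : ((List.range (s.length - d)).map
        (fun i => dotS (polyStep^[d] [1]) s (d + 1) i)).length = s.length - d := by simp
    rw [hlen]
    have hm : s.length - d - 1 = s.length - (d + 1) := by omega
    rw [hm]
    apply List.ext_getElem
    · simp
    · intro k h1 h2
      simp only [List.length_map, List.length_range] at h1
      simp only [List.getElem_map, List.getElem_range]
      rw [getD_map_range _ _ _ (by omega), getD_map_range _ _ _ (by omega),
        Function.iterate_succ_apply',
        show d + 1 = (polyStep^[d] [1]).length from (iterate_polyStep_length d).symm]
      exact (dotS_step _ s k).symm

-- ===== VERDICT (by name: the statement is the Claim_ definition above) =====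
theorem differencing_spec : Claim_equal_differencing := by
  intro series order _
  unfold Spec_differencing differencing differencing_alt
  rw [foldl_const_iterate, PySem.List.length_pyRange_one]
  simp only [sub_zero]
  by_cases h0 : order ≤ 0
  · rw [if_pos h0]
    have : order.toNat = 0 := by omega
    rw [this]; rfl
  · rw [if_neg h0]
    by_cases h1 : (series.length : Int) ≤ order
    · rw [if_pos h1, iterate_eq_conv]
      have : series.length - order.toNat = 0 := by omega
      rw [this]; rfl
    · rw [if_neg h1, iterate_eq_conv]
      rw [foldl_const_iterate polyStep (List.range order.toNat) [1], List.length_range]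
      apply List.map_congr_left
      intro i _
      rw [dotB_eq_dotS]
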